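-- pv_equiv track=rewrite | github.com/6Shuzhou/mahjong | 3.py | is_seven_pairs
-- ===== SOURCE A (Python) =====
-- from collections import Counter
--
-- def is_seven_pairs(hand):
--     """
--     判断14张牌是否组成“七对子”：每种牌的数目均为偶数
--     注意：如果某种牌出现4次，也可视为2对。
--     """
--     if len(hand) != 14:
--         return False
--     counts = Counter(hand)
--     for count in counts.values():
--         if count % 2 != 0:  # 如果有牌出现次数为奇数，则不能构成完整的对子
--             return False
--     return True
-- ===== SOURCE B (Python) =====
-- def is_seven_pairs(hand):
--     if len(hand) != 14:
--         return False
--     s = sorted(hand)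
--     for i in range(0, 14, 2):
--         if s[i] != s[i + 1]:
--             return False
--     return True
-- ===== Notes on version B (the rewrite author's own statement) =====
-- stated objective: alternative
-- what changed: Replaces Counter-based all-counts-even parity checking with sort-then-compare-adjacent: sorted(hand)[i] == sorted(hand)[i+1] for each even i.
import Mathlib
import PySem

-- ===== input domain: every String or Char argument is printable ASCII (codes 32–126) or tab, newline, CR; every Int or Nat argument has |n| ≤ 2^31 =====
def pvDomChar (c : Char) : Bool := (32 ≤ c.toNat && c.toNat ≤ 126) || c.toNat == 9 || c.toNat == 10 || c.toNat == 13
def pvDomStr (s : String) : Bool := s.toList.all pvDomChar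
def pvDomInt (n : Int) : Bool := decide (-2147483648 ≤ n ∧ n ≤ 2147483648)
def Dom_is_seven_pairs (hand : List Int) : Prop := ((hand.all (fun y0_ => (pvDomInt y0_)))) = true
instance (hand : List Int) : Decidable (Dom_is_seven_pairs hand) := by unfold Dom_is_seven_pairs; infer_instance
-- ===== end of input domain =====

-- B replaces A's Counter-based all-counts-even check with sort-then-compare-adjacent pairs (alternative algorithm, same behaviour).

-- ===== PORT A =====
-- the 'for count in counts.values(): if count % 2 != 0: return False' loop
def pvLoopA : List Int → Bool
  | [] => true
  | c :: rest => if PySem.Int.mod c 2 ≠ 0 then false else pvLoopA rest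

def is_seven_pairs (hand : List Int) : Bool :=
  if hand.length ≠ 14 then false
  else pvLoopA (PySem.Dict.counter hand).values

-- ===== PORT B =====
-- the 'for i in range(0, 14, 2): if s[i] != s[i+1]: return False' loop
def pvChkB (s : List Int) : List Int → Bool
  | [] => true
  | i :: rest =>
    match PySem.List.pyGet? s i, PySem.List.pyGet? s (i + 1) with
    | some a, some b => if a ≠ b then false else pvChkB s rest
    | _, _ => false

def is_seven_pairs_alt (hand : List Int) : Bool :=
  if hand.length ≠ 14 then false
  else
    let s := PySem.List.sorted hand (fun x => x) false
    pvChkB s (PySem.List.pyRange 0 14 2)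

-- ===== PRECONDITION & SPEC =====
def Spec_is_seven_pairs (hand : List Int) (out : Bool) : Prop := out = is_seven_pairs_alt hand
instance (hand : List Int) (out : Bool) : Decidable (Spec_is_seven_pairs hand out) := by unfold Spec_is_seven_pairs; infer_instance

-- ===== CLAIM (what is proved, stated in full; the proofs are below) =====
def Claim_equal_is_seven_pairs : Prop := ∀ (hand : List Int), Dom_is_seven_pairs hand → Spec_is_seven_pairs hand (is_seven_pairs hand)

-- ===== LEMMAS AND PROOFS =====

-- structural adjacent-pairs predicate used to bridge the two loops
def pvPairEq : List Int → Bool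
  | [] => true
  | [_] => false
  | a :: b :: t => if a ≠ b then false else pvPairEq t

-- A's loop is 'every value is even'
lemma pvLoopA_eq_all (l : List Int) :
    pvLoopA l = l.all (fun c => PySem.Int.mod c 2 == 0) := by
  induction l with
  | nil => rfl
  | cons c rest ih =>
      simp only [pvLoopA, List.all_cons, ih]
      rw [PySem.Int.mod_eq_emod_of_pos (a := c) (b := 2) (by norm_num)]
      rcases Int.emod_two_eq c with h | h <;> simp [h]

-- B's index loop over range(0,14,2) is pvPairEq on a length-14 list
lemma pvChkB_eq_pairEq (s : List Int) (h : s.length = 14) :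
    pvChkB s (PySem.List.pyRange 0 14 2) = pvPairEq s := by
  match s, h with
  | [a0,a1,a2,a3,a4,a5,a6,a7,a8,a9,a10,a11,a12,a13], _ => rfl

-- on a sorted list, adjacent pairs all equal ↔ every count is even
lemma pairEq_iff_counts_even : ∀ (s : List Int), s.Pairwise (· ≤ ·) →
    (pvPairEq s = true ↔ ∀ x : Int, Even (s.count x))
  | [], _ => by simp [pvPairEq]
  | [a], _ => by
      simp only [pvPairEq, Bool.false_eq_true, false_iff, not_forall]
      exact ⟨a, by simp [Nat.even_iff]⟩
  | a :: b :: t, hs => by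
      rcases List.pairwise_cons.mp hs with ⟨hab, hs'⟩
      rcases List.pairwise_cons.mp hs' with ⟨hbt, ht⟩
      by_cases hab' : a = b
      · subst hab'
        have ih := pairEq_iff_counts_even t ht
        rw [show pvPairEq (a :: a :: t) = pvPairEq t from by simp [pvPairEq], ih]
        have hcc : ∀ x : Int, (a :: a :: t).count x = t.count x + (if x = a then 2 else 0) := by
          intro x
          by_cases hx : x = a
          · subst hx; simp
          · have hxa : a ≠ x := fun h => hx h.symm
            simp [hx, hxa]
        constructor
        · intro h x
          have := h x
          rw [Nat.even_iff] at this ⊢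
          rw [hcc x]
          split_ifs <;> omega
        · intro h x
          have := h x
          rw [hcc x] at this
          rw [Nat.even_iff] at this ⊢
          split_ifs at this <;> omega
      · simp only [pvPairEq, if_pos hab', Bool.false_eq_true, false_iff, not_forall]
        refine ⟨a, ?_⟩
        have hlt : a < b := lt_of_le_of_ne (hab b (by simp)) hab'
        have hat : t.count a = 0 := by
          rw [List.count_eq_zero]
          intro hmem
          exact absurd (hbt a hmem) (not_le.mpr hlt)
        simp [Ne.symm hab', hat, Nat.even_iff]

-- counter values are the counts of the distinct elements
lemma pvLoopA_counter_iff (hand : List Int) :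
    pvLoopA (PySem.Dict.counter hand).values = true ↔ ∀ x : Int, Even (hand.count x) := by
  rw [pvLoopA_eq_all]
  have hv : (PySem.Dict.counter hand).values
      = (PySem.Set.ofList hand).map (fun k => (hand.count k : Int)) := by
    show ((PySem.Dict.counter hand).items).map (·.2) = _
    rw [PySem.Dict.items_counter]
    simp
  rw [hv]
  simp only [List.all_map, List.all_eq_true, Function.comp]
  constructor
  · intro h x
    by_cases hx : x ∈ hand
    · have := h x ((PySem.Set.mem_ofList hand x).mpr hx)
      have h2 : PySem.Int.mod (hand.count x : Int) 2 = ((hand.count x % 2 : Nat) : Int) :=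
        PySem.Int.mod_natCast _ 2
      simp only [h2, beq_iff_eq] at this
      rw [Nat.even_iff]
      omega
    · simp [List.count_eq_zero_of_not_mem hx]
  · intro h k _
    have := h k
    have h2 : PySem.Int.mod (hand.count k : Int) 2 = ((hand.count k % 2 : Nat) : Int) :=
      PySem.Int.mod_natCast _ 2
    rw [Nat.even_iff] at this
    simp only [h2, beq_iff_eq]
    omega

-- ===== VERDICT (by name: the statement is the Claim_ definition above) =====
theorem is_seven_pairs_spec : Claim_equal_is_seven_pairs := by
  intro hand _
  show is_seven_pairs hand = is_seven_pairs_alt hand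
  unfold is_seven_pairs is_seven_pairs_alt
  by_cases hlen : hand.length = 14
  · simp only [hlen, ne_eq, not_true_eq_false, if_false]
    set s := PySem.List.sorted hand (fun x => x) false with hsdef
    have hslen : s.length = 14 := by rw [hsdef, PySem.List.length_sorted, hlen]
    have hperm : s.Perm hand := PySem.List.sorted_perm hand (fun x => x) false
    have hsorted : s.Pairwise (· ≤ ·) := by
      simpa using PySem.List.sorted_pairwise hand (fun x => x)
    rw [pvChkB_eq_pairEq s hslen]
    have hA := pvLoopA_counter_iff hand
    have hB := pairEq_iff_counts_even s hsorted
    have hc : ∀ x : Int, s.count x = hand.count x := fun x => hperm.count_eq x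
    simp only [hc] at hB
    by_cases h : ∀ x : Int, Even (hand.count x)
    · rw [hA.mpr h, hB.mpr h]
    · have h1 : pvLoopA (PySem.Dict.counter hand).values ≠ true := fun hh => h (hA.mp hh)
      have h2 : pvPairEq s ≠ true := fun hh => h (hB.mp hh)
      simp only [Bool.not_eq_true] at h1 h2
      rw [h1, h2]
  · simp [hlen]
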